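-- pv_equiv track=rewrite | github.com/JAMM-JAMM/algorithm-study | Programmers/PS/level2/n 배열 자르기.py | solution
-- ===== SOURCE A (Python) =====
-- def solution(n, left, right):
--
--     answer = list()
--
--     for i in range(left, right+1):
--         a = (i // n) + 1
--         b = (i % n) + 1
--         if a < b:
--             a, b = b, a
--         answer.append(a)
--     return answer
-- ===== SOURCE B (Python) =====
-- def solution(n, left, right):
--     # Row-block construction: walk the rows of the virtual n*n matrix that the
--     # window [left, right] touches and emit, for each row r, the clipped column
--     # segment [max(r, c) + 1 for c in c0..c1), concatenating the segments.
--     flat = []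
--     for r in range(left // n, right // n + 1):
--         c0 = max(0, left - r * n)
--         c1 = min(n, right + 1 - r * n)
--         flat.extend(max(r, c) + 1 for c in range(c0, c1))
--     return flat
-- ===== Notes on version B (the rewrite author's own statement) =====
-- stated objective: alternative
-- what changed: B is a row-block construction: it walks the rows of the virtual n×n matrix the window [left,right] touches and concatenates each row's clipped column segment [max(r,c)+1 for c in c0..c1), instead of deriving every element from its linear index via i//n and i%n.
-- outside the precondition, e.g. on solution(-2, 0, 1): A returns [1, 0], B returns []; on solution(0, 5, 3): A returns [], B raises ZeroDivisionError
import Mathlib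
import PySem

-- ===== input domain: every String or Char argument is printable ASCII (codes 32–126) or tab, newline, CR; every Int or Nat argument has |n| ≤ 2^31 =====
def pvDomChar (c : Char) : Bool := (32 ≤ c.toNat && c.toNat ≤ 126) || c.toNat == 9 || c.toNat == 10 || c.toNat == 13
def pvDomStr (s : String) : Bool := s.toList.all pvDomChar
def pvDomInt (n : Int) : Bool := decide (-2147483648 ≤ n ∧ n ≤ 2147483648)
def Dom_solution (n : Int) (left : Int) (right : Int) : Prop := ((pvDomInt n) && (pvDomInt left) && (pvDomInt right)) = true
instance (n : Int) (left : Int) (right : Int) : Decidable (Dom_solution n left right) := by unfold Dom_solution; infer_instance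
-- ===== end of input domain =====

-- B walks the rows of the virtual n×n matrix that the window touches and concatenates each
-- row's clipped column segment, instead of computing each element from i//n and i%n;
-- alternative decomposition, same cost.


-- ===== PORT A =====
def solution (n : Int) (left : Int) (right : Int) : List Int :=
  (PySem.List.pyRange left (right + 1) 1).foldl
    (fun answer i =>
      let a := PySem.Int.floordiv i n + 1
      let b := PySem.Int.mod i n + 1
      answer ++ [if a < b then b else a])
    []

-- ===== PORT B =====
def solution_alt (n : Int) (left : Int) (right : Int) : List Int :=
  (PySem.List.pyRange (PySem.Int.floordiv left n) (PySem.Int.floordiv right n + 1) 1).foldl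
    (fun flat r =>
      let c0 := max 0 (left - r * n)
      let c1 := min n (right + 1 - r * n)
      flat ++ (PySem.List.pyRange c0 c1 1).map (fun c => max r c + 1))
    []

-- ===== PRECONDITION & SPEC =====
-- Pre_ restricts to the task's natural domain n ≥ 1 (a positive array size): for n = 0 A
-- raises ZeroDivisionError on any nonempty window, and for negative n A returns negative
-- floor-division values that are meaningless for an array of size n (B returns [] there).
def Pre_solution (n : Int) (left : Int) (right : Int) : Prop := 1 ≤ n
instance (n : Int) (left : Int) (right : Int) : Decidable (Pre_solution n left right) := by
  unfold Pre_solution; infer_instance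
def pvWitness_solution : Int × Int × Int := (3, 2, 5)

def Spec_solution (n : Int) (left : Int) (right : Int) (out : List Int) : Prop := out = solution_alt n left right
instance (n : Int) (left : Int) (right : Int) (out : List Int) : Decidable (Spec_solution n left right out) := by unfold Spec_solution; infer_instance

-- ===== CLAIM (what is proved, stated in full; the proofs are below) =====
def Claim_equal_solution : Prop := ∀ (n : Int) (left : Int) (right : Int), Dom_solution n left right → Pre_solution n left right → Spec_solution n left right (solution n left right)

-- ===== LEMMAS AND PROOFS =====

-- the per-index value both programs compute
def pvVal (n i : Int) : Int := max (PySem.Int.floordiv i n) (PySem.Int.mod i n) + 1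

lemma solution_eq_map (n left right : Int) :
    solution n left right = (PySem.List.pyRange left (right + 1) 1).map (pvVal n) := by
  unfold solution
  rw [PySem.List.foldl_append_singleton_eq_map]
  simp only [List.nil_append]
  apply List.map_congr_left
  intro i _
  unfold pvVal
  rcases le_total (PySem.Int.floordiv i n) (PySem.Int.mod i n) with h | h
  · simp [max_eq_right h]; omega
  · simp [max_eq_left h]; omega

-- one clipped row segment, read through pvVal at the linear indices it covers
lemma seg_eq (n r L R : Int) (hn : 1 ≤ n) :
    (PySem.List.pyRange (max 0 (L - r * n)) (min n (R - r * n)) 1).map (fun c => max r c + 1)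
      = (PySem.List.pyRange (max L (r * n)) (min R ((r + 1) * n)) 1).map (pvVal n) := by
  have hq : (r + 1) * n = r * n + n := by ring
  rw [PySem.List.pyRange_one, PySem.List.pyRange_one]
  rw [List.map_map, List.map_map]
  rw [show (min n (R - r * n) - max 0 (L - r * n)).toNat
        = (min R ((r + 1) * n) - max L (r * n)).toNat by omega]
  apply List.map_congr_left
  intro k hk
  have hkl := List.mem_range.mp hk
  have hc0 : (0 : Int) ≤ max 0 (L - r * n) + (k : Int) := by omega
  have hc1 : max 0 (L - r * n) + (k : Int) < n := by omega
  simp only [Function.comp]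
  have hx : max L (r * n) + (k : Int) = r * n + (max 0 (L - r * n) + (k : Int)) := by omega
  unfold pvVal
  have hdiv : PySem.Int.floordiv (max L (r * n) + (k : Int)) n = r := by
    rw [PySem.Int.floordiv_eq_iff_of_pos (by omega)]
    omega
  have hmod : PySem.Int.mod (max L (r * n) + (k : Int)) n = max 0 (L - r * n) + (k : Int) := by
    have := PySem.Int.floordiv_mul_add_mod (max L (r * n) + (k : Int)) n
    rw [hdiv] at this
    omega
  rw [hdiv, hmod]

-- the concatenated clipped row segments over rows a..b-1 cover the clipped index range
lemma rows_eq (n L R : Int) (hn : 1 ≤ n) : ∀ (m : Nat) (a b : Int), b - a ≤ (m : Int) →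
    (PySem.List.pyRange a b 1).foldl
      (fun flat r => flat ++
        (PySem.List.pyRange (max 0 (L - r * n)) (min n (R - r * n)) 1).map (fun c => max r c + 1))
      []
      = (PySem.List.pyRange (max L (a * n)) (min R (b * n)) 1).map (pvVal n) := by
  intro m
  induction m with
  | zero =>
    intro a b h
    have hmul : b * n ≤ a * n := mul_le_mul_of_nonneg_right (by omega) (by omega)
    rw [PySem.List.pyRange_one_eq_nil (a := a) (b := b) (by omega),
        PySem.List.pyRange_one_eq_nil (a := max L (a * n)) (b := min R (b * n)) (by omega)]
    simp
  | succ m ih =>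
    intro a b h
    by_cases hab : a < b
    swap
    · have hmul : b * n ≤ a * n := mul_le_mul_of_nonneg_right (by omega) (by omega)
      rw [PySem.List.pyRange_one_eq_nil (a := a) (b := b) (by omega),
          PySem.List.pyRange_one_eq_nil (a := max L (a * n)) (b := min R (b * n)) (by omega)]
      simp
    · have h1 : a * n ≤ (a + 1) * n := mul_le_mul_of_nonneg_right (by omega) (by omega)
      have h2 : (a + 1) * n ≤ b * n := mul_le_mul_of_nonneg_right (by omega) (by omega)
      rw [PySem.List.pyRange_one_cons hab]
      simp only [List.foldl_cons, List.nil_append]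
      rw [PySem.List.foldl_append_eq_flatMap]
      have hrec := ih (a + 1) b (by omega)
      rw [PySem.List.foldl_append_eq_flatMap, List.nil_append] at hrec
      rw [hrec, seg_eq n a L R hn, ← List.map_append]
      congr 1
      by_cases hR : (a + 1) * n ≤ R <;> by_cases hL : L ≤ (a + 1) * n
      · rw [show min R ((a + 1) * n) = (a + 1) * n by omega,
            show max L ((a + 1) * n) = (a + 1) * n by omega,
            ← PySem.List.pyRange_one_append (max L (a * n)) ((a + 1) * n) (min R (b * n))
              (by omega) (by omega)]
      · rw [PySem.List.pyRange_one_eq_nil (a := max L (a * n)) (b := min R ((a + 1) * n))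
              (by omega),
            show max L ((a + 1) * n) = max L (a * n) by omega]
        simp
      · rw [PySem.List.pyRange_one_eq_nil (a := max L ((a + 1) * n)) (b := min R (b * n))
              (by omega),
            show min R ((a + 1) * n) = min R (b * n) by omega]
        simp
      · rw [PySem.List.pyRange_one_eq_nil (a := max L (a * n)) (b := min R ((a + 1) * n))
              (by omega),
            PySem.List.pyRange_one_eq_nil (a := max L ((a + 1) * n)) (b := min R (b * n))
              (by omega),
            PySem.List.pyRange_one_eq_nil (a := max L (a * n)) (b := min R (b * n)) (by omega)]
        simp

lemma floordiv_mul_le (x n : Int) (hn : 1 ≤ n) : PySem.Int.floordiv x n * n ≤ x := by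
  have h1 := PySem.Int.floordiv_mul_add_mod x n
  have h2 := PySem.Int.mod_nonneg x (b := n) (by omega)
  omega

lemma lt_floordiv_succ_mul (x n : Int) (hn : 1 ≤ n) : x < (PySem.Int.floordiv x n + 1) * n := by
  have h1 := PySem.Int.floordiv_mul_add_mod x n
  have h2 := PySem.Int.mod_lt x (b := n) (by omega)
  nlinarith [h1, h2]

-- ===== VERDICT (by name: the statement is the Claim_ definition above) =====
theorem solution_spec : Claim_equal_solution := by
  intro n left right _ hn
  replace hn : 1 ≤ n := hn
  unfold Spec_solution solution_alt
  set lo := PySem.Int.floordiv left n with hlo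
  set hi := PySem.Int.floordiv right n with hhi
  rw [rows_eq n left (right + 1) hn (hi + 1 - lo).toNat lo (hi + 1) (by omega)]
  have hlo_le : lo * n ≤ left := floordiv_mul_le left n hn
  have hlt : right < (hi + 1) * n := lt_floordiv_succ_mul right n hn
  rw [show max left (lo * n) = left by omega,
      show min (right + 1) ((hi + 1) * n) = right + 1 by omega]
  exact solution_eq_map n left right
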